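-- pv_equiv track=rewrite | github.com/fqf2009/LeetCode | 0828_CountUniqueCharactersOfAllSubstringsOfGivenString.py | countDistinctLettersInAllSubstring
-- ===== SOURCE A (Python) =====
-- def countDistinctLettersInAllSubstring(s: str) -> int:
--     p = [-1] * 26
--     dp = 0
--     res = 0
--     for i, ch in enumerate(s):
--         j = ord(ch) - ord('A')
--         dp += i - p[j]
--         res += dp
--         p[j] = i
--
--     return res
-- ===== SOURCE B (Python) =====
-- def countDistinctLettersInAllSubstring(s: str) -> int:
--     # Contribution counting: bucket the occurrence indices of each letter slot,
--     # then each occurrence k with previous same-slot occurrence prev contributes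
--     # (k - prev) * (n - k) substrings in which it is the first of its slot.
--     n = len(s)
--     occ = [[] for _ in range(26)]
--     for i, ch in enumerate(s):
--         occ[ord(ch) - ord('A')].append(i)
--     res = 0
--     for ks in occ:
--         prev = -1
--         for k in ks:
--             res += (k - prev) * (n - k)
--             prev = k
--     return res
-- ===== Notes on version B (the rewrite author's own statement) =====
-- stated objective: alternative
-- what changed: Replaces A's running distinct-count DP accumulator with a two-phase contribution count: bucket every letter slot's occurrence indices in one pass, then sum (k - prev) * (n - k) over each bucket.
import Mathlib
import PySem

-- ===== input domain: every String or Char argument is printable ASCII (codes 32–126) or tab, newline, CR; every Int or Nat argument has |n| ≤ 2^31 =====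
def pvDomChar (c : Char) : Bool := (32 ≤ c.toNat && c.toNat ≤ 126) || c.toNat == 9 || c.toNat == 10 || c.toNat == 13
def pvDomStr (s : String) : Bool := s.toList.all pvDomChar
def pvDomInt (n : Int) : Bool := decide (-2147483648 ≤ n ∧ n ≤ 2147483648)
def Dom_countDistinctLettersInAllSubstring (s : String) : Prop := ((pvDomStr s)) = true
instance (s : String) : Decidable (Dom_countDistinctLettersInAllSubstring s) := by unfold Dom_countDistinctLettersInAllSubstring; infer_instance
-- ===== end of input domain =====

-- B replaces A's running distinct-count accumulator (dp) with a two-phase contribution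
-- count (bucket each letter slot's occurrence indices, then sum (k - prev) * (n - k));
-- same O(n) cost, different decomposition.

-- ===== PORT A =====
-- one loop iteration of A: j = ord(ch) - ord('A'); dp += i - p[j]; res += dp; p[j] = i
def stepA (st : List Int × Int × Int) (ic : Int × Char) : List Int × Int × Int :=
  let j : Int := (ic.2.toNat : Int) - 65
  let dp := st.2.1 + (ic.1 - PySem.List.pyGetD st.1 j 0)
  (PySem.List.pySetD st.1 j ic.1, dp, st.2.2 + dp)

def countDistinctLettersInAllSubstring (s : String) : Int :=
  ((PySem.List.enumerate s.toList 0).foldl stepA (List.replicate 26 (-1), 0, 0)).2.2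

-- ===== PORT B =====
-- occ[ord(ch) - ord('A')].append(i)
def addOcc (occ : List (List Int)) (ic : Int × Char) : List (List Int) :=
  let j : Int := (ic.2.toNat : Int) - 65
  PySem.List.pySetD occ j (PySem.List.pyGetD occ j [] ++ [ic.1])

-- inner loop of B's second phase: prev = -1; for k in ks: res += (k - prev) * (n - k); prev = k
def bucketSum (n : Int) (res : Int) (ks : List Int) : Int :=
  (ks.foldl (fun (st : Int × Int) k => (st.1 + (k - st.2) * (n - k), k)) (res, -1)).1

def countDistinctLettersInAllSubstring_alt (s : String) : Int :=
  let n : Int := PySem.Str.len s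
  let occ := (PySem.List.enumerate s.toList 0).foldl addOcc (List.replicate 26 ([] : List Int))
  occ.foldl (bucketSum n) 0

-- ===== PRECONDITION & SPEC =====
-- Pre_ excludes exactly the strings containing a character with code outside 39..90:
-- there A (and B) raises IndexError (the length-26 array is indexed by ord(ch) - 65,
-- and Python accepts only indices in [-26, 25]).
def Pre_countDistinctLettersInAllSubstring (s : String) : Prop :=
  (s.toList.all fun c => 39 ≤ c.toNat && c.toNat ≤ 90) = true
instance (s : String) : Decidable (Pre_countDistinctLettersInAllSubstring s) := by
  unfold Pre_countDistinctLettersInAllSubstring; infer_instance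

def pvWitness_countDistinctLettersInAllSubstring : String := "AB0"

def Spec_countDistinctLettersInAllSubstring (s : String) (out : Int) : Prop := out = countDistinctLettersInAllSubstring_alt s
instance (s : String) (out : Int) : Decidable (Spec_countDistinctLettersInAllSubstring s out) := by unfold Spec_countDistinctLettersInAllSubstring; infer_instance

-- ===== CLAIM (what is proved, stated in full; the proofs are below) =====
def Claim_equal_countDistinctLettersInAllSubstring : Prop := ∀ (s : String), Dom_countDistinctLettersInAllSubstring s → Pre_countDistinctLettersInAllSubstring s → Spec_countDistinctLettersInAllSubstring s (countDistinctLettersInAllSubstring s)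

-- ===== LEMMAS AND PROOFS =====

-- effective Nat slot of a character (Python's negative indices wrap: p[j] = p[j + 26] for j < 0)
def eff (c : Char) : Nat := (c.toNat - 39) % 26

-- the second-phase inner fold with an arbitrary initial state
def gI (n : Int) (st : Int × Int) (ks : List Int) : Int × Int :=
  ks.foldl (fun st k => (st.1 + (k - st.2) * (n - k), k)) st

def lastD (ks : List Int) : Int := ks.getLastD (-1)

def buildOcc (cs : List Char) : List (List Int) :=
  (PySem.List.enumerate cs 0).foldl addOcc (List.replicate 26 ([] : List Int))


lemma pyGetD26 {α : Type} (xs : List α) (d : α) (h : xs.length = 26) (n : Nat)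
    (h1 : 39 ≤ n) (h2 : n ≤ 90) :
    PySem.List.pyGetD xs ((n : Int) - 65) d = xs[(n - 39) % 26]'(by omega) := by
  have hlt : (n - 39) % 26 < xs.length := by omega
  by_cases hge : 65 ≤ n
  · have : ((n : Int) - 65) = ((n - 65 : Nat) : Int) := by omega
    rw [this, PySem.List.pyGetD_natCast]
    rw [List.getD_eq_getElem _ _ (by omega)]
    congr 1; omega
  · have hl : n < 65 := by omega
    have : ((n : Int) - 65) = -((65 - n : Nat) : Int) := by omega
    rw [this, PySem.List.pyGetD_neg_natCast _ _ _ (by omega) (by omega)]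
    congr 1; omega

lemma pySetD26 {α : Type} (xs : List α) (v : α) (h : xs.length = 26) (n : Nat)
    (h1 : 39 ≤ n) (h2 : n ≤ 90) :
    PySem.List.pySetD xs ((n : Int) - 65) v = xs.set ((n - 39) % 26) v := by
  simp only [PySem.List.pySetD, PySem.List.pySet?, PySem.List.pyIdx?]
  by_cases hge : 65 ≤ n
  · rw [if_pos (by omega), if_pos (by omega)]
    simp only [Option.map_some, Option.getD_some]
    congr 1; omega
  · rw [if_neg (by omega), if_pos (by omega)]
    simp only [Option.map_some, Option.getD_some]
    congr 1; omega


lemma gI_cons (n r p k : Int) (t : List Int) :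
    gI n (r, p) (k :: t) = gI n (r + (k - p) * (n - k), k) t := rfl

lemma gI_snd (n : Int) (r p : Int) (ks : List Int) : (gI n (r, p) ks).2 = ks.getLastD p := by
  induction ks generalizing r p with
  | nil => rfl
  | cons k t ih => rw [gI_cons, ih, List.getLastD_cons]

lemma gI_fst_add (n : Int) (r p : Int) (ks : List Int) :
    (gI n (r, p) ks).1 = r + (gI n (0, p) ks).1 := by
  induction ks generalizing r p with
  | nil => simp [gI]
  | cons k t ih =>
    rw [gI_cons, gI_cons, ih, ih (0 + (k - p) * (n - k))]; ring

lemma gI_shift (n : Int) (r p : Int) (ks : List Int) :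
    (gI (n + 1) (r, p) ks).1 = (gI n (r, p) ks).1 + (ks.getLastD p - p) := by
  induction ks generalizing r p with
  | nil => simp [gI]
  | cons k t ih =>
    rw [gI_cons, gI_cons, ih, gI_fst_add, gI_fst_add n (r + (k - p) * (n - k)), List.getLastD_cons]
    ring

lemma sum_set_int :
    ∀ (l : List Int) (t : Nat) (v : Int) (h : t < l.length),
      (l.set t v).sum = l.sum + (v - l[t]'h) := by
  intro l
  induction l with
  | nil => intro t v h; simp at h
  | cons x xs ih =>
    intro t v h
    cases t with
    | zero => simp; ring
    | succ t => simp [List.set, ih t v (by simpa using h)]; ring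

lemma sum_map_set {β : Type} (f : β → Int)
    (l : List β) (t : Nat) (v : β) (h : t < l.length) :
      ((l.set t v).map f).sum = (l.map f).sum + (f v - f (l[t]'h)) := by
  rw [List.map_set]
  rw [sum_set_int (l.map f) t (f v) (by simpa using h)]
  simp

lemma length_foldl_addOcc (l : List (Int × Char)) :
    ∀ occ : List (List Int), (l.foldl addOcc occ).length = occ.length := by
  induction l with
  | nil => intro occ; rfl
  | cons ic t ih =>
    intro occ
    rw [List.foldl_cons, ih]
    simp [addOcc, PySem.List.pySetD, PySem.List.pySet?]
    cases PySem.List.pyIdx? occ.length (((ic.2.toNat : Int) - 65)) <;> simp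

lemma length_buildOcc (cs : List Char) : (buildOcc cs).length = 26 := by
  rw [buildOcc, length_foldl_addOcc]; simp

lemma buildOcc_snoc (cs : List Char) (c : Char) (hc : 39 ≤ c.toNat ∧ c.toNat ≤ 90) :
    buildOcc (cs ++ [c]) =
      (buildOcc cs).set (eff c)
        ((buildOcc cs)[eff c]'(by rw [length_buildOcc]; exact Nat.mod_lt _ (by norm_num)) ++ [(cs.length : Int)]) := by
  rw [buildOcc, PySem.List.enumerate_append, List.foldl_append]
  rw [show PySem.List.enumerate [c] (0 + (cs.length : Int)) = [((cs.length : Int), c)] by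
    simp [PySem.List.enumerate_cons, PySem.List.enumerate_nil]]
  rw [List.foldl_cons, List.foldl_nil]
  show addOcc (buildOcc cs) ((cs.length : Int), c) = _
  unfold addOcc eff
  simp only
  rw [pyGetD26 _ _ (length_buildOcc cs) c.toNat hc.1 hc.2,
      pySetD26 _ _ (length_buildOcc cs) c.toNat hc.1 hc.2]

lemma lastD_concat (ks : List Int) (a : Int) : lastD (ks ++ [a]) = a := by
  simp [lastD]

lemma gI_fst_snoc (n r p k : Int) (ks : List Int) :
    (gI n (r, p) (ks ++ [k])).1 = (gI n (r, p) ks).1 + (k - ks.getLastD p) * (n - k) := by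
  have h : gI n (r, p) (ks ++ [k])
      = ((gI n (r, p) ks).1 + (k - (gI n (r, p) ks).2) * (n - k), k) := by
    unfold gI; rw [List.foldl_append]; rfl
  rw [h, gI_snd]

lemma sum_gI_shift (n : Int) (occ : List (List Int)) :
    (occ.map (fun ks => (gI (n + 1) (0, -1) ks).1)).sum
      = (occ.map (fun ks => (gI n (0, -1) ks).1)).sum
        + (occ.map (fun ks => lastD ks + 1)).sum := by
  induction occ with
  | nil => simp
  | cons ks t ih =>
    simp only [List.map_cons, List.sum_cons]
    rw [ih, gI_shift]
    simp only [lastD]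
    ring

lemma mainA (cs : List Char) (hpre : ∀ c ∈ cs, 39 ≤ c.toNat ∧ c.toNat ≤ 90) :
    (PySem.List.enumerate cs 0).foldl stepA (List.replicate 26 (-1), 0, 0)
      = ((buildOcc cs).map lastD,
         ((buildOcc cs).map (fun ks => lastD ks + 1)).sum,
         ((buildOcc cs).map (fun ks => (gI (cs.length : Int) (0, -1) ks).1)).sum) := by
  induction cs using List.reverseRecOn with
  | nil => rfl
  | append_singleton cs c ih =>
    have hc := hpre c (by simp)
    rw [PySem.List.enumerate_append, List.foldl_append,
        ih (fun x hx => hpre x (by simp [hx]))]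
    rw [show PySem.List.enumerate [c] ((0 : Int) + (cs.length : Int)) = [((cs.length : Int), c)] by
      simp [PySem.List.enumerate_cons, PySem.List.enumerate_nil]]
    rw [List.foldl_cons, List.foldl_nil, buildOcc_snoc cs c hc]
    have hL : (buildOcc cs).length = 26 := length_buildOcc cs
    have ht : eff c < (buildOcc cs).length := by rw [hL]; exact Nat.mod_lt _ (by norm_num)
    have hmapL : ((buildOcc cs).map lastD).length = 26 := by simpa using hL
    simp only [stepA]
    rw [pyGetD26 _ _ hmapL c.toNat hc.1 hc.2, pySetD26 _ _ hmapL c.toNat hc.1 hc.2]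
    simp only [eff] at ht ⊢
    simp only [Prod.mk.injEq]
    refine ⟨?_, ?_, ?_⟩
    · rw [List.map_set, lastD_concat]
    · rw [sum_map_set (fun ks => lastD ks + 1) _ ((c.toNat - 39) % 26) _ ht, lastD_concat]
      rw [List.getElem_map]
      ring
    · have hlen : (((cs ++ [c]).length : Nat) : Int) = (cs.length : Int) + 1 := by
        simp [List.length_append]
      rw [hlen]
      rw [sum_map_set (fun ks => (gI ((cs.length : Int) + 1) (0, -1) ks).1) _ ((c.toNat - 39) % 26) _ ht]
      rw [sum_gI_shift, gI_fst_snoc, gI_shift]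
      rw [List.getElem_map]
      simp only [lastD]
      ring

lemma foldl_bucketSum (n : Int) :
    ∀ (occ : List (List Int)) (r : Int),
      occ.foldl (bucketSum n) r = r + (occ.map (fun ks => (gI n (0, -1) ks).1)).sum := by
  intro occ
  induction occ with
  | nil => intro r; simp
  | cons ks t ih =>
    intro r
    rw [List.foldl_cons, ih]
    show (gI n (r, -1) ks).1 + _ = _
    rw [gI_fst_add]
    simp; ring

-- ===== VERDICT (by name: the statement is the Claim_ definition above) =====
theorem countDistinctLettersInAllSubstring_spec : Claim_equal_countDistinctLettersInAllSubstring := by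
  intro s _ hpre
  have hpre' : ∀ c ∈ s.toList, 39 ≤ c.toNat ∧ c.toNat ≤ 90 := by
    intro c hc
    have := List.all_eq_true.mp hpre c hc
    simpa using this
  unfold Spec_countDistinctLettersInAllSubstring
  unfold countDistinctLettersInAllSubstring countDistinctLettersInAllSubstring_alt
  rw [mainA s.toList hpre']
  rw [show ((PySem.List.enumerate s.toList 0).foldl addOcc (List.replicate 26 ([] : List Int))) = buildOcc s.toList from rfl]
  rw [foldl_bucketSum]
  simp [PySem.Str.len_eq]
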